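-- pv_equiv track=rewrite | github.com/PSnik-Kostiantyn/SplitBrainDetector | app/model/isSplitBrain.py | isSplitBrain
-- ===== SOURCE A (Python) =====
-- def isSplitBrain(nodes, matrix):
--
--     node_types = set(node[0] for node in nodes)
--     def find_islands(matrix):
--         size = len(matrix)
--         visited = [False] * size
--         islands = []
--
--         def dfs(node, island):
--             visited[node] = True
--             island.append(node)
--             for neighbor, connected in enumerate(matrix[node]):
--                 if connected and not visited[neighbor]:
--                     dfs(neighbor, island)
--
--         for i in range(size):
--             if not visited[i]:
--                 island = []
--                 dfs(i, island)
--                 islands.append(island)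
--         return islands
--
--     islands = find_islands(matrix)
--
--     functional_islands = 0
--     for island in islands:
--         types_present = set(nodes[i][0] for i in island)
--
--         if node_types.issubset(types_present):
--             functional_islands += 1
--             if functional_islands >= 2:
--                 return True
--
--     return False
-- ===== SOURCE B (Python) =====
-- def isSplitBrain(nodes, matrix):
--     # Iterative stack-based DFS (no recursion) fused with inline counting of
--     # functional components instead of A's islands-list + second counting loop.
--     node_types = {node[0] for node in nodes}
--     size = len(matrix)
--     visited = [False] * size
--     functional = 0
--     for start in range(size):
--         if visited[start]:
--             continue
--         island_types = set()
--         stack = [start]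
--         while stack:
--             node = stack.pop()
--             if visited[node]:
--                 continue
--             visited[node] = True
--             island_types.add(nodes[node][0])
--             # push in reverse row order so neighbours are popped in row order
--             for j in range(len(matrix[node]) - 1, -1, -1):
--                 if matrix[node][j]:
--                     stack.append(j)
--         if node_types.issubset(island_types):
--             functional += 1
--     return functional >= 2
-- ===== Notes on version B (the rewrite author's own statement) =====
-- stated objective: alternative
-- what changed: Replaces A's recursive per-node DFS plus a separate islands-list and second counting loop with a single pass whose component traversal is an iterative explicit-stack DFS collecting each component's type set directly, counting functional components inline and returning count >= 2; Pre_ also excludes inputs whose matrix has more rows than there are nodes, where A can still return True because its early return fires after two functional islands before it ever reads the missing node entries, while B, which reads node types during traversal, raises IndexError there.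
-- outside the precondition, e.g. on isSplitBrain([['a'], ['a']], [[0, 0, 0], [0, 0, 0], [0, 0, 0]]): A returns True, B raises IndexError
import Mathlib
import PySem

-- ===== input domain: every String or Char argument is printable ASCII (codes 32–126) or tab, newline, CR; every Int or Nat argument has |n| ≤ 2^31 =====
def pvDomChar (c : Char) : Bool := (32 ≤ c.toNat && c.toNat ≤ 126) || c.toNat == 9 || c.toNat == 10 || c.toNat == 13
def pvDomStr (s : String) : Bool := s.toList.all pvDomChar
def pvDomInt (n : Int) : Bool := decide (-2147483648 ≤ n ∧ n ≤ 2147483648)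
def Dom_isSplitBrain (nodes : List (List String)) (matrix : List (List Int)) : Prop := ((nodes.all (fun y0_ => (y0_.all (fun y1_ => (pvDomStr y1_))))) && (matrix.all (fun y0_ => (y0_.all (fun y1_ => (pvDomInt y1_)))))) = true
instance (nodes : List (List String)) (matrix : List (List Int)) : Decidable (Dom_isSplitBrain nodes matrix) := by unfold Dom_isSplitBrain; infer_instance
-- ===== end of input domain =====

-- B changes the decomposition: iterative explicit-stack DFS and inline counting in one pass,
-- instead of A's recursive DFS producing an islands list scanned by a second early-return loop.

-- nodes[i][0]: exact under Pre_ (i < |nodes|, nodes[i] nonempty there); Python raises outside Pre_.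
def pvTypeOf (nodes : List (List String)) (i : Nat) : String := (nodes.getD i []).getD 0 ""

-- ===== PORT A =====
-- the `for neighbor, connected in enumerate(matrix[node])` loop of dfs, with `dfs` abstracted;
-- visited[neighbor] → getD (exact under Pre_: truthy neighbours are in range; Python raises outside Pre_)
def pvRowA (dfs : Nat → List Bool → List Nat → List Bool × List Nat) :
    List Int → Nat → List Bool → List Nat → List Bool × List Nat
  | [], _, v, isl => (v, isl)
  | c :: rest, j, v, isl =>
    if c ≠ 0 ∧ v.getD j false = false then
      let r := dfs j v isl
      pvRowA dfs rest (j + 1) r.1 r.2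
    else pvRowA dfs rest (j + 1) v isl

-- `dfs(node, island)`: fuel only makes the recursion total; callers pass fuel = |visited|+1,
-- which exceeds the recursion depth (each nested call marks a fresh node), so fuel never runs out under Pre_.
def pvDfsA (mat : List (List Int)) : Nat → Nat → List Bool → List Nat → List Bool × List Nat
  | 0, _, v, isl => (v, isl)
  | f + 1, node, v, isl =>
    pvRowA (fun n v' i' => pvDfsA mat f n v' i') (mat.getD node []) 0 (v.set node true) (isl ++ [node])

-- `for i in range(size): if not visited[i]: … dfs(i, island); islands.append(island)`
def pvIslandsA (mat : List (List Int)) : List Nat → List Bool → List (List Nat) → List (List Nat)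
  | [], _, acc => acc
  | i :: rest, v, acc =>
    if v.getD i false = false then
      let r := pvDfsA mat (v.length + 1) i v []
      pvIslandsA mat rest r.1 (acc ++ [r.2])
    else pvIslandsA mat rest v acc

-- the counting loop with its early `return True` once functional_islands reaches 2
def pvCountA (nt : PySem.Set String) (nodes : List (List String)) :
    List (List Nat) → Nat → Bool
  | [], _ => false
  | isl :: rest, k =>
    if PySem.Set.issubset nt (PySem.Set.ofList (isl.map (pvTypeOf nodes))) then
      if 2 ≤ k + 1 then true else pvCountA nt nodes rest (k + 1)
    else pvCountA nt nodes rest k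

def isSplitBrain (nodes : List (List String)) (matrix : List (List Int)) : Bool :=
  let nt : PySem.Set String := PySem.Set.ofList (nodes.map (fun n => n.getD 0 ""))
  pvCountA nt nodes
    (pvIslandsA matrix (List.range matrix.length) (List.replicate matrix.length false) []) 0

-- ===== PORT B =====
-- B pushes the truthy indices of a row in reverse order and pops the Python list's last
-- element; modelled head-as-top, the new stack is (truthy indices in row order) ++ rest.
def pvNbrsFrom : List Int → Nat → List Nat
  | [], _ => []
  | c :: rest, j => if c ≠ 0 then j :: pvNbrsFrom rest (j + 1) else pvNbrsFrom rest (j + 1)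

-- termination helper for the stack loop (cited by decreasing_by)
theorem pvCountFalse_set_lt : ∀ (v : List Bool) (n : Nat), n < v.length →
    v.getD n false = false → (v.set n true).count false < v.count false := by
  intro v
  induction v with
  | nil => intro n h; simp at h
  | cons c tl ih =>
    intro n hn hv
    cases n with
    | zero => simp_all
    | succ m =>
      simp only [List.length_cons, Nat.succ_lt_succ_iff] at hn
      simp only [List.getD, List.getElem?_cons_succ] at hv
      have := ih m hn hv
      simp [List.count_cons]
      omega

-- the `while stack:` loop: pop, skip if visited, else mark, add the node's type, push neighbours.
-- `visited[node]` → guard n < |v| (exact under Pre_: every pushed index is in range; Python raises outside Pre_).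
def pvStackB (nodes : List (List String)) (mat : List (List Int)) :
    List Nat → List Bool → PySem.Set String → List Bool × PySem.Set String
  | [], v, t => (v, t)
  | n :: rest, v, t =>
    if h : n < v.length ∧ v.getD n false = false then
      pvStackB nodes mat (pvNbrsFrom (mat.getD n []) 0 ++ rest) (v.set n true)
        (PySem.Set.add t (pvTypeOf nodes n))
    else pvStackB nodes mat rest v t
  termination_by s v _ => (v.count false, s.length)
  decreasing_by
  · exact Prod.Lex.left _ _ (pvCountFalse_set_lt v n h.1 h.2)
  · exact Prod.Lex.right _ (Nat.lt_succ_self _)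

-- `for start in range(size): … functional += 1` fused outer loop
def pvOuterB (nodes : List (List String)) (mat : List (List Int)) (nt : PySem.Set String) :
    List Nat → List Bool → Nat → Nat
  | [], _, k => k
  | i :: rest, v, k =>
    if v.getD i false then pvOuterB nodes mat nt rest v k
    else
      let r := pvStackB nodes mat [i] v []
      pvOuterB nodes mat nt rest r.1 (if PySem.Set.issubset nt r.2 then k + 1 else k)

def isSplitBrain_alt (nodes : List (List String)) (matrix : List (List Int)) : Bool :=
  let nt : PySem.Set String := PySem.Set.ofList (nodes.map (fun n => n.getD 0 ""))
  decide (2 ≤ pvOuterB nodes matrix nt (List.range matrix.length)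
      (List.replicate matrix.length false) 0)

-- ===== PRECONDITION & SPEC =====
-- Every node list nonempty (node[0]), nodes cover all matrix indices (nodes[i][0]), and every
-- truthy matrix entry points inside the matrix (visited[neighbor]); A raises IndexError outside
-- this, except that when the matrix has more rows than there are nodes A can still return True
-- (its early return fires after two functional islands before it reads the missing node
-- entries) while B, which reads node types during traversal, raises IndexError there.
def Pre_isSplitBrain (nodes : List (List String)) (matrix : List (List Int)) : Prop :=
  (∀ n ∈ nodes, n ≠ []) ∧ matrix.length ≤ nodes.length ∧
    ∀ row ∈ matrix, ∀ j < row.length, row.getD j 0 ≠ 0 → j < matrix.length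

instance (nodes : List (List String)) (matrix : List (List Int)) :
    Decidable (Pre_isSplitBrain nodes matrix) := by unfold Pre_isSplitBrain; infer_instance

def pvWitness_isSplitBrain : List (List String) × List (List Int) :=
  ([["a"], ["a"]], [[0, 0], [0, 0]])

def Spec_isSplitBrain (nodes : List (List String)) (matrix : List (List Int)) (out : Bool) : Prop := out = isSplitBrain_alt nodes matrix
instance (nodes : List (List String)) (matrix : List (List Int)) (out : Bool) : Decidable (Spec_isSplitBrain nodes matrix out) := by unfold Spec_isSplitBrain; infer_instance

-- ===== CLAIM (what is proved, stated in full; the proofs are below) =====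
def Claim_equal_isSplitBrain : Prop := ∀ (nodes : List (List String)) (matrix : List (List Int)), Dom_isSplitBrain nodes matrix → Pre_isSplitBrain nodes matrix → Spec_isSplitBrain nodes matrix (isSplitBrain nodes matrix)

-- ===== LEMMAS AND PROOFS =====

-- proof-only helpers
def pvAddTy (nodes : List (List String)) (t : PySem.Set String) (L : List Nat) : PySem.Set String :=
  L.foldl (fun s x => PySem.Set.add s (pvTypeOf nodes x)) t

def pvFn (nt : PySem.Set String) (nodes : List (List String)) (isl : List Nat) : Bool :=
  PySem.Set.issubset nt (PySem.Set.ofList (isl.map (pvTypeOf nodes)))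

theorem pvAddTy_nil_left (nodes : List (List String)) (L : List Nat) :
    pvAddTy nodes ([] : PySem.Set String) L = PySem.Set.ofList (L.map (pvTypeOf nodes)) := by
  rw [pvAddTy, ← PySem.Set.update_map_eq_foldl_add, ← PySem.Set.update_nil_left]

theorem pvAddTy_append (nodes : List (List String)) (t : PySem.Set String) (L1 L2 : List Nat) :
    pvAddTy nodes t (L1 ++ L2) = pvAddTy nodes (pvAddTy nodes t L1) L2 := by
  simp [pvAddTy, List.foldl_append]

-- simulation of A's row loop (with the recursive dfs at fuel f) by B's stack loop
theorem pvRowSim (nodes : List (List String)) (mat : List (List Int)) (f : Nat)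
    (IH : ∀ (v : List Bool) (node : Nat) (isl : List Nat) (t : PySem.Set String) (rest : List Nat),
        v.length = mat.length → v.count false < f → node < v.length → v.getD node false = false →
        ∃ V L, pvDfsA mat f node v isl = (V, isl ++ L) ∧
          pvStackB nodes mat (node :: rest) v t = pvStackB nodes mat rest V (pvAddTy nodes t L) ∧
          V.length = v.length ∧ V.count false < v.count false) :
    ∀ (row : List Int) (j0 : Nat) (v : List Bool) (isl : List Nat) (t : PySem.Set String)
      (rest : List Nat),
      v.length = mat.length → v.count false < f →
      (∀ i < row.length, row.getD i 0 ≠ 0 → j0 + i < mat.length) →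
      ∃ V L, pvRowA (fun n v' i' => pvDfsA mat f n v' i') row j0 v isl = (V, isl ++ L) ∧
        pvStackB nodes mat (pvNbrsFrom row j0 ++ rest) v t
          = pvStackB nodes mat rest V (pvAddTy nodes t L) ∧
        V.length = v.length ∧ V.count false ≤ v.count false := by
  intro row
  induction row with
  | nil =>
    intro j0 v isl t rest hlen hcnt _
    exact ⟨v, [], by simp [pvRowA], by simp [pvNbrsFrom, pvAddTy], rfl, le_refl _⟩
  | cons c rest' ihr =>
    intro j0 v isl t rest hlen hcnt hrow
    by_cases hc : c ≠ 0 ∧ v.getD j0 false = false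
    · -- dfs fires
      have hj0 : j0 < v.length := by
        have := hrow 0 (by simp) (by simpa using hc.1)
        omega
      obtain ⟨V1, L1, e1, s1, len1, cnt1⟩ :=
        IH v j0 isl t (pvNbrsFrom rest' (j0 + 1) ++ rest) hlen hcnt hj0 hc.2
      obtain ⟨V2, L2, e2, s2, len2, cnt2⟩ :=
        ihr (j0 + 1) V1 (isl ++ L1) (pvAddTy nodes t L1) rest (len1.trans hlen)
          (lt_of_le_of_lt (Nat.le_of_lt cnt1) hcnt)
          (by intro i hi hne; have := hrow (i + 1) (by simpa using Nat.succ_lt_succ hi)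
                (by simpa using hne); omega)
      refine ⟨V2, L1 ++ L2, ?_, ?_, len2.trans len1, le_trans cnt2 (Nat.le_of_lt cnt1)⟩
      · simp only [pvRowA, if_pos hc, e1, e2, List.append_assoc]
      · have hnb : pvNbrsFrom (c :: rest') j0 = j0 :: pvNbrsFrom rest' (j0 + 1) := by
          simp [pvNbrsFrom, hc.1]
        rw [hnb, List.cons_append, s1, s2, pvAddTy_append]
    · -- skipped entry
      obtain ⟨V, L, e, s, len, cnt⟩ :=
        ihr (j0 + 1) v isl t rest hlen hcnt
          (by intro i hi hne; have := hrow (i + 1) (by simpa using Nat.succ_lt_succ hi)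
                (by simpa using hne); omega)
      refine ⟨V, L, ?_, ?_, len, cnt⟩
      · simp only [pvRowA, if_neg hc, e]
      · by_cases hc0 : c = 0
        · rw [show pvNbrsFrom (c :: rest') j0 = pvNbrsFrom rest' (j0 + 1) by
            simp [pvNbrsFrom, hc0], s]
        · have hvis : v.getD j0 false = true := by
            cases hgd : v.getD j0 false
            · exact absurd ⟨hc0, hgd⟩ hc
            · rfl
          have hnb : pvNbrsFrom (c :: rest') j0 = j0 :: pvNbrsFrom rest' (j0 + 1) := by
            simp [pvNbrsFrom, hc0]
          rw [hnb, List.cons_append, pvStackB, dif_neg (by rw [hvis]; simp), s]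

-- simulation of A's recursive dfs by B's stack loop
theorem pvDfsSim (nodes : List (List String)) (mat : List (List Int))
    (hmat : ∀ row ∈ mat, ∀ j < row.length, row.getD j 0 ≠ 0 → j < mat.length) :
    ∀ (f : Nat) (v : List Bool) (node : Nat) (isl : List Nat) (t : PySem.Set String)
      (rest : List Nat),
      v.length = mat.length → v.count false < f → node < v.length → v.getD node false = false →
      ∃ V L, pvDfsA mat f node v isl = (V, isl ++ L) ∧
        pvStackB nodes mat (node :: rest) v t = pvStackB nodes mat rest V (pvAddTy nodes t L) ∧
        V.length = v.length ∧ V.count false < v.count false := by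
  intro f
  induction f with
  | zero => intro v node isl t rest _ hcnt _ _; omega
  | succ f ihf =>
    intro v node isl t rest hlen hcnt hnode hnv
    have hrowmem : mat.getD node [] ∈ mat := by
      rw [List.getD_eq_getElem mat [] (hlen ▸ hnode)]
      exact List.getElem_mem _
    have hsetlt := pvCountFalse_set_lt v node hnode hnv
    obtain ⟨V, L', e, s, len, cnt⟩ :=
      pvRowSim nodes mat f ihf (mat.getD node []) 0 (v.set node true) (isl ++ [node])
        (PySem.Set.add t (pvTypeOf nodes node)) rest
        ((List.length_set ..).trans hlen)
        (by omega)
        (by intro i hi hne; simpa using hmat _ hrowmem i hi hne)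
    refine ⟨V, node :: L', ?_, ?_, len.trans (List.length_set ..), by omega⟩
    · simp only [pvDfsA, e, List.append_assoc, List.singleton_append]
    · rw [pvStackB, dif_pos ⟨hnode, hnv⟩, s]
      simp [pvAddTy]

-- the islands list accumulator is append-only
theorem pvIslandsA_acc (mat : List (List Int)) :
    ∀ (is : List Nat) (v : List Bool) (acc : List (List Nat)),
      pvIslandsA mat is v acc = acc ++ pvIslandsA mat is v [] := by
  intro is
  induction is with
  | nil => intro v acc; simp [pvIslandsA]
  | cons i rest ih =>
    intro v acc
    by_cases hv : v.getD i false = false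
    · simp only [pvIslandsA, if_pos hv, List.nil_append]
      rw [ih, ih ((pvDfsA mat (v.length + 1) i v []).1)
          [(pvDfsA mat (v.length + 1) i v []).2], ← List.append_assoc]
    · rw [pvIslandsA, if_neg hv, pvIslandsA, if_neg hv, ih]

-- B's fused outer loop counts exactly A's functional islands
theorem pvOutSim (nodes : List (List String)) (mat : List (List Int)) (nt : PySem.Set String)
    (hmat : ∀ row ∈ mat, ∀ j < row.length, row.getD j 0 ≠ 0 → j < mat.length) :
    ∀ (is : List Nat) (v : List Bool) (k : Nat),
      v.length = mat.length → (∀ i ∈ is, i < mat.length) →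
      pvOuterB nodes mat nt is v k = k + (pvIslandsA mat is v []).countP (pvFn nt nodes) := by
  intro is
  induction is with
  | nil => intro v k _ _; simp [pvOuterB, pvIslandsA]
  | cons i rest ih =>
    intro v k hlen his
    by_cases hv : v.getD i false = false
    · have hi : i < v.length := hlen ▸ his i (by simp)
      obtain ⟨V, L, e, s, len, -⟩ :=
        pvDfsSim nodes mat hmat (v.length + 1) v i [] ([] : PySem.Set String) [] hlen
          (Nat.lt_succ_of_le (List.count_le_length ..)) hi hv
      have e' : pvDfsA mat (v.length + 1) i v [] = (V, L) := by simpa using e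
      have hstack : pvStackB nodes mat [i] v ([] : PySem.Set String)
          = (V, PySem.Set.ofList (L.map (pvTypeOf nodes))) := by
        rw [s, pvAddTy_nil_left]; simp [pvStackB]
      simp only [pvOuterB, pvIslandsA, hv, if_pos, Bool.false_eq_true, if_false,
        List.nil_append, hstack, e']
      rw [ih V _ (len.trans hlen) (fun j hj => his j (by simp [hj])),
        pvIslandsA_acc mat rest V [L], List.countP_append]
      simp only [List.countP_cons, List.countP_nil, pvFn]
      split_ifs <;> omega
    · have hvt : v.getD i false = true := by
        cases hgd : v.getD i false
        · exact absurd hgd hv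
        · rfl
      rw [pvOuterB, if_pos hvt, pvIslandsA, if_neg hv,
        ih v k hlen (fun j hj => his j (by simp [hj]))]

-- A's early-return counting loop is "at least two functional islands"
theorem pvCountA_eq (nt : PySem.Set String) (nodes : List (List String)) :
    ∀ (ls : List (List Nat)) (k : Nat), k ≤ 1 →
      pvCountA nt nodes ls k = decide (2 ≤ k + ls.countP (pvFn nt nodes)) := by
  intro ls
  induction ls with
  | nil => intro k hk; simp [pvCountA]; omega
  | cons isl rest ih =>
    intro k hk
    rw [pvCountA]
    by_cases hs : PySem.Set.issubset nt (PySem.Set.ofList (isl.map (pvTypeOf nodes))) = true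
    · rw [if_pos hs]
      by_cases hk2 : 2 ≤ k + 1
      · rw [if_pos hk2]
        have hk1 : k = 1 := by omega
        subst hk1
        rw [eq_comm, decide_eq_true_eq]
        simp only [List.countP_cons, pvFn, hs, if_true]
        omega
      · rw [if_neg hk2, ih (k + 1) (by omega)]
        simp only [List.countP_cons, pvFn, hs, if_true, decide_eq_decide]
        omega
    · rw [if_neg hs, ih k hk]
      simp [pvFn, hs]

-- ===== VERDICT (by name: the statement is the Claim_ definition above) =====
theorem isSplitBrain_spec : Claim_equal_isSplitBrain := by
  intro nodes matrix _hdom hpre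
  show isSplitBrain nodes matrix = isSplitBrain_alt nodes matrix
  show pvCountA (PySem.Set.ofList (nodes.map (fun n => n.getD 0 ""))) nodes
      (pvIslandsA matrix (List.range matrix.length) (List.replicate matrix.length false) []) 0
    = decide (2 ≤ pvOuterB nodes matrix (PySem.Set.ofList (nodes.map (fun n => n.getD 0 "")))
        (List.range matrix.length) (List.replicate matrix.length false) 0)
  rw [pvCountA_eq _ _ _ 0 (by omega),
    pvOutSim nodes matrix _ hpre.2.2 (List.range matrix.length)
      (List.replicate matrix.length false) 0 (List.length_replicate ..)
      (fun i hi => List.mem_range.mp hi)]
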